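-- pv_equiv track=rewrite | github.com/JanKaczmarski/university | text_algorithms/lab0/counter.py | cnt_len_without
-- ===== SOURCE A (Python) =====
-- def cnt_len_without(text: str, keys: list[str]) -> int:
--     set_keys = {k for k in keys}
--     """
--     Return length of string but don't count char `key`
--
--     Positional Arguments:
--     text -- string in which len you want to get
--     keys -- characters you don't want included in this count
--     """
--     i = 0
--     for char in text:
--         if char not in set_keys:
--             i += 1
--
--     return i
-- ===== SOURCE B (Python) =====
-- def cnt_len_without(text: str, keys: list[str]) -> int:
--     # Frequency-table approach: tally distinct characters once, then sum the
--     # counts of the characters that are not excluded.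
--     counts = {}
--     for ch in text:
--         counts[ch] = counts.get(ch, 0) + 1
--     excluded = set(keys)
--     return sum(n for ch, n in counts.items() if ch not in excluded)
-- ===== Notes on version B (the rewrite author's own statement) =====
-- stated objective: alternative
-- what changed: B builds a character frequency table (dict) in one pass and sums the counts of the distinct characters not in the excluded set, instead of A's per-character conditional increment loop.
import Mathlib
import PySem

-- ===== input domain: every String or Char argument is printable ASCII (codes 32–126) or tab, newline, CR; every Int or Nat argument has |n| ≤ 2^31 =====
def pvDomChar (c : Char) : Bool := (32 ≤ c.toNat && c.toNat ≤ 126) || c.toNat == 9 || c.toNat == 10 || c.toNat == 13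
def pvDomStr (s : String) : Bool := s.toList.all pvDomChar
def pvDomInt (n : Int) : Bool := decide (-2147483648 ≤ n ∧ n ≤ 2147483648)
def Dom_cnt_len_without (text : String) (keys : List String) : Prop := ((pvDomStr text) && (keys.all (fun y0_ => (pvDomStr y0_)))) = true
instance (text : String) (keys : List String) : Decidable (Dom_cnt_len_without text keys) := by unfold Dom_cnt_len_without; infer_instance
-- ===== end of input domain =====

-- B tallies characters in a dict and sums counts of the non-excluded distinct characters;
-- A counts matching characters one by one. Same value, different decomposition.

-- ===== PORT A =====
def cnt_len_without (text : String) (keys : List String) : Int :=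
  let set_keys : PySem.Set String := PySem.Set.ofList keys
  text.toList.foldl (fun i char =>
    if !(set_keys.contains (String.mk [char])) then i + 1 else i) 0

-- ===== PORT B =====
def cnt_len_without_alt (text : String) (keys : List String) : Int :=
  let counts : PySem.Dict Char Int :=
    text.toList.foldl (fun d ch => d.insert ch (d.getD ch 0 + 1)) PySem.Dict.empty
  let excluded : PySem.Set String := PySem.Set.ofList keys
  (counts.items.filter (fun p => !(excluded.contains (String.mk [p.1])))).foldl
    (fun s p => s + p.2) 0

-- ===== PRECONDITION & SPEC =====
def Spec_cnt_len_without (text : String) (keys : List String) (out : Int) : Prop := out = cnt_len_without_alt text keys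
instance (text : String) (keys : List String) (out : Int) : Decidable (Spec_cnt_len_without text keys out) := by unfold Spec_cnt_len_without; infer_instance

-- ===== CLAIM (what is proved, stated in full; the proofs are below) =====
def Claim_equal_cnt_len_without : Prop := ∀ (text : String) (keys : List String), Dom_cnt_len_without text keys → Spec_cnt_len_without text keys (cnt_len_without text keys)

-- ===== LEMMAS AND PROOFS =====

-- Summing l.count over the distinct members (in PySem set order) that satisfy p is countP p l.
lemma sum_count_set_filter_eq_countP (l : List Char) (p : Char → Bool) :
    (((PySem.Set.ofList l).filter p).map (fun c => (l.count c : Int))).sum = (l.countP p : Int) := by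
  have hperm : (PySem.Set.ofList l).Perm l.dedup := by
    apply List.perm_of_nodup_nodup_toFinset_eq (PySem.Set.nodup_ofList l) l.nodup_dedup
    apply Finset.ext
    intro c
    simp [List.mem_toFinset, PySem.Set.mem_ofList, List.mem_dedup]
  have h2 : ((((PySem.Set.ofList l).filter p).map (fun c => (l.count c : Int))).sum)
      = (((l.dedup.filter p).map (fun c => (l.count c : Int))).sum) :=
    ((hperm.filter p).map _).sum_eq
  rw [h2]
  have h3 := List.sum_map_count_dedup_filter_eq_countP p l
  have : ((l.dedup.filter p).map (fun c => (l.count c : Int))).sum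
      = (((l.dedup.filter p).map (fun c => l.count c)).sum : ℕ) := by
    rw [Nat.cast_list_sum, List.map_map]; rfl
  rw [this, h3]

-- ===== VERDICT (by name: the statement is the Claim_ definition above) =====
theorem cnt_len_without_spec : Claim_equal_cnt_len_without := by
  intro text keys _
  unfold Spec_cnt_len_without cnt_len_without cnt_len_without_alt
  simp only [PySem.Dict.foldl_insert_getD_add_one_eq_counter, PySem.Dict.items_counter]
  set p : Char → Bool := fun c => !((PySem.Set.ofList keys).contains (String.mk [c])) with hp
  rw [PySem.List.foldl_if_add_one (p := p)]
  have hfm : ((PySem.Set.ofList text.toList).map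
        (fun k => (k, (text.toList.count k : Int)))).filter (fun q => p q.1)
      = ((PySem.Set.ofList text.toList).filter p).map
        (fun k => (k, (text.toList.count k : Int))) := by
    rw [List.filter_map]; rfl
  have : (((PySem.Set.ofList text.toList).map
        (fun k => (k, (text.toList.count k : Int)))).filter (fun q => p q.1)).foldl
        (fun s q => s + q.2) 0
      = (((PySem.Set.ofList text.toList).filter p).map
          (fun c => (text.toList.count c : Int))).sum := by
    rw [hfm, PySem.List.foldl_add (g := fun q : Char × Int => q.2), List.map_map]
    simp only [Function.comp_def]
    ring
  rw [this, sum_count_set_filter_eq_countP]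
  simp
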